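-- pv_equiv track=rewrite | github.com/stevenson0421/Feature-Selection | Code/3_stopping.py | MaxDelta
-- ===== SOURCE A (Python) =====
-- def MaxDelta(score, args, task, size_df):
--     max_delta = 0
--     index = len(score) - 1
--     for i in range(len(score)-1, 0, -1):
--         delta = score[i] - score[i-1]
--         if delta > max_delta and score[i-1] != 0:
--             max_delta = delta
--             index = i
--
--     return index
-- ===== SOURCE B (Python) =====
-- def MaxDelta(score, args, task, size_df):
--     n = len(score)
--     # Stage 1: the best qualifying increase (value only, no index bookkeeping).
--     best = max([score[i] - score[i - 1] for i in range(1, n) if score[i - 1] != 0],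
--                default=0)
--     if best <= 0:
--         return n - 1
--     # Stage 2: search downward for the last index attaining it.
--     i = n - 1
--     while score[i] - score[i - 1] != best or score[i - 1] == 0:
--         i -= 1
--     return i
-- ===== Notes on version B (the rewrite author's own statement) =====
-- stated objective: alternative
-- what changed: Replaces A's single backward scan carrying coupled (max_delta, index) state with two decoupled stages: first compute only the best qualifying increase with max() over a comprehension, then a separate downward while-search finds the last index attaining that value (empty/non-positive case defaults to len(score)-1).
import Mathlib
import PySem

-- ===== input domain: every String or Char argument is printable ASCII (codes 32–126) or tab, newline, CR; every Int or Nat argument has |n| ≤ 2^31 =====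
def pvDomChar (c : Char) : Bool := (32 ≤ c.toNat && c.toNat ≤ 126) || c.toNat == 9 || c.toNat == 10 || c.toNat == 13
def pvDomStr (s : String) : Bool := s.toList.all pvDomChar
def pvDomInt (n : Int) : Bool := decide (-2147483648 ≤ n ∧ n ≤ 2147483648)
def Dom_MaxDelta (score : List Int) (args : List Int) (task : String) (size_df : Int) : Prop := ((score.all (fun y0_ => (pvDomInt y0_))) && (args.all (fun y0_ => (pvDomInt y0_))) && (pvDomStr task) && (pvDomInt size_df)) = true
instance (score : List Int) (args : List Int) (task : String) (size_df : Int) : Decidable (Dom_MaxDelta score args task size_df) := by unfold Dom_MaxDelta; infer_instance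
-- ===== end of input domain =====

-- B decouples A's single (max, index) scan into two stages — max of qualifying deltas, then a
-- downward search for the last index attaining it (alternative decomposition, same O(n) cost).

-- ===== PORT A =====
-- pyGetD is exact here: every index i (and i-1) drawn from range(len(score)-1, 0, -1) is in range.
def MaxDelta (score : List Int) (args : List Int) (task : String) (size_df : Int) : Int :=
  let st := (PySem.List.pyRange (PySem.List.len score - 1) 0 (-1)).foldl
    (fun (st : Int × Int) i =>
      let delta := PySem.List.pyGetD score i 0 - PySem.List.pyGetD score (i - 1) 0
      if delta > st.1 ∧ PySem.List.pyGetD score (i - 1) 0 ≠ 0 then (delta, i) else st)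
    (0, PySem.List.len score - 1)
  st.2

-- ===== PORT B =====
-- Stage-2 while loop of Source B, ported as recursion on the Nat index i (it decreases by 1 each
-- iteration).  The 0 branch is unreachable whenever best > 0: best is then attained at some
-- index ≥ 1, so the search stops there first (proved in the lemmas below).
def pvSearchB (score : List Int) (best : Int) : Nat → Int
  | 0 => 0
  | Nat.succ j =>
    if PySem.List.pyGetD score ((j : Int) + 1) 0 - PySem.List.pyGetD score (j : Int) 0 ≠ best
        ∨ PySem.List.pyGetD score (j : Int) 0 = 0
    then pvSearchB score best j
    else (j : Int) + 1

-- pyGetD is exact here: every index from range(1, n) is in range; max([...], default=0) is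
-- PySem.List.max? with the 0 default supplied on none.
def MaxDelta_alt (score : List Int) (args : List Int) (task : String) (size_df : Int) : Int :=
  let n := PySem.List.len score
  let best :=
    match PySem.List.max?
        ((PySem.List.pyRange 1 n 1).filterMap (fun i =>
          if PySem.List.pyGetD score (i - 1) 0 ≠ 0
          then some (PySem.List.pyGetD score i 0 - PySem.List.pyGetD score (i - 1) 0)
          else none))
        (fun x => x) with
    | some v => v
    | none => 0
  if best ≤ 0 then n - 1
  else pvSearchB score best (score.length - 1)

-- ===== PRECONDITION & SPEC =====
def Spec_MaxDelta (score : List Int) (args : List Int) (task : String) (size_df : Int) (out : Int) : Prop := out = MaxDelta_alt score args task size_df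
instance (score : List Int) (args : List Int) (task : String) (size_df : Int) (out : Int) : Decidable (Spec_MaxDelta score args task size_df out) := by unfold Spec_MaxDelta; infer_instance

-- ===== CLAIM (what is proved, stated in full; the proofs are below) =====
def Claim_equal_MaxDelta : Prop := ∀ (score : List Int) (args : List Int) (task : String) (size_df : Int), Dom_MaxDelta score args task size_df → Spec_MaxDelta score args task size_df (MaxDelta score args task size_df)

-- ===== LEMMAS AND PROOFS =====

-- running maximum of the qualifying deltas f i (P i holds) over i = 1..k, floored at m
def pvMx (f : Int → Int) (P : Int → Prop) [DecidablePred P] (m : Int) : Nat → Int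
  | 0 => m
  | Nat.succ k => if P ((k : Int) + 1) then max (pvMx f P m k) (f ((k : Int) + 1)) else pvMx f P m k

-- greatest i ≤ k with P i and f i = M (default j)
def pvArg (f : Int → Int) (P : Int → Prop) [DecidablePred P] (M j : Int) : Nat → Int
  | 0 => j
  | Nat.succ k => if P ((k : Int) + 1) ∧ f ((k : Int) + 1) = M then ((k : Int) + 1) else pvArg f P M j k

lemma pvMx_le (f : Int → Int) (P : Int → Prop) [DecidablePred P] (m : Int) (k : Nat) :
    m ≤ pvMx f P m k := by
  induction k with
  | zero => simp [pvMx]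
  | succ k ih => simp only [pvMx]; split_ifs <;> omega

lemma pvMx_raise (f : Int → Int) (P : Int → Prop) [DecidablePred P] (m m' : Int) (k : Nat)
    (h : m ≤ m') : pvMx f P m' k = max m' (pvMx f P m k) := by
  induction k with
  | zero => simp [pvMx]; omega
  | succ k ih => simp only [pvMx]; split_ifs <;> omega

lemma pvMx_attained (f : Int → Int) (P : Int → Prop) [DecidablePred P] (m : Int) :
    ∀ k : Nat, pvMx f P m k > m →
      ∃ i : Nat, 1 ≤ i ∧ i ≤ k ∧ P (i : Int) ∧ f (i : Int) = pvMx f P m k := by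
  intro k
  induction k with
  | zero => simp [pvMx]
  | succ k ih =>
    intro h
    simp only [pvMx] at h ⊢
    by_cases hp : P ((k : Int) + 1)
    · rw [if_pos hp] at h ⊢
      by_cases hge : pvMx f P m k ≤ f ((k : Int) + 1)
      · refine ⟨k + 1, by omega, le_rfl, by push_cast; exact hp, by push_cast; omega⟩
      · have : max (pvMx f P m k) (f ((k : Int) + 1)) = pvMx f P m k := by omega
        rw [this] at h ⊢
        obtain ⟨i, h1, h2, h3, h4⟩ := ih h
        exact ⟨i, h1, by omega, h3, h4⟩
    · rw [if_neg hp] at h ⊢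
      obtain ⟨i, h1, h2, h3, h4⟩ := ih h
      exact ⟨i, h1, by omega, h3, h4⟩

lemma pvArg_default (f : Int → Int) (P : Int → Prop) [DecidablePred P] (M j j' : Int) :
    ∀ k : Nat, (∃ i : Nat, 1 ≤ i ∧ i ≤ k ∧ P (i : Int) ∧ f (i : Int) = M) →
    pvArg f P M j k = pvArg f P M j' k := by
  intro k
  induction k with
  | zero => rintro ⟨i, h1, h2, _⟩; omega
  | succ k ih =>
    rintro ⟨i, h1, h2, h3, h4⟩
    simp only [pvArg]
    split_ifs with hc
    · rfl
    · apply ih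
      refine ⟨i, h1, ?_, h3, h4⟩
      rcases Nat.lt_or_ge i (k + 1) with hlt | hge
      · omega
      · exfalso
        have : i = k + 1 := by omega
        subst this
        push_cast at h3 h4
        exact hc ⟨h3, h4⟩

-- A's backward running-max fold over k..1 equals (pvMx, pvArg-or-default).
lemma pvAeq (f : Int → Int) (P : Int → Prop) [DecidablePred P] :
    ∀ (k : Nat) (m j : Int),
    (PySem.List.pyRange (k : Int) 0 (-1)).foldl
        (fun (st : Int × Int) i => if f i > st.1 ∧ P i then (f i, i) else st) (m, j)
    = (pvMx f P m k,
       if pvMx f P m k > m then pvArg f P (pvMx f P m k) j k else j) := by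
  intro k
  induction k with
  | zero =>
    intro m j
    rw [PySem.List.pyRange_neg_one_eq_nil (by norm_num)]
    simp [pvMx]
  | succ k ih =>
    intro m j
    have hcast : ((k + 1 : Nat) : Int) = (k : Int) + 1 := by push_cast; ring
    rw [hcast, PySem.List.pyRange_neg_one_cons (by omega), List.foldl_cons,
      show ((k : Int) + 1 - 1) = (k : Int) from by ring]
    by_cases hq : f ((k : Int) + 1) > m ∧ P ((k : Int) + 1)
    · rw [if_pos hq, ih]
      have hm' : m ≤ f ((k : Int) + 1) := le_of_lt hq.1
      have hraise := pvMx_raise f P m (f ((k : Int) + 1)) k hm'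
      have hmx : pvMx f P m (k + 1) = max (pvMx f P m k) (f ((k : Int) + 1)) := by
        simp only [pvMx, if_pos hq.2]
      by_cases hgt : pvMx f P (f ((k : Int) + 1)) k > f ((k : Int) + 1)
      · rw [if_pos hgt]
        have hM : pvMx f P (f ((k : Int) + 1)) k = pvMx f P m (k + 1) := by
          rw [hraise, hmx]; omega
        have hattain : ∃ i : Nat, 1 ≤ i ∧ i ≤ k ∧ P (i : Int) ∧ f (i : Int) = pvMx f P m (k + 1) := by
          have := pvMx_attained f P (f ((k : Int) + 1)) k hgt
          rw [hM] at this; exact this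
        have hmgt : pvMx f P m (k + 1) > m := by
          have := pvMx_le f P (f ((k : Int) + 1)) k; omega
        rw [if_pos hmgt, hM]
        have hne : ¬ (P ((k : Int) + 1) ∧ f ((k : Int) + 1) = pvMx f P m (k + 1)) := by
          rintro ⟨_, he⟩; omega
        have : pvArg f P (pvMx f P m (k + 1)) j (k + 1)
            = pvArg f P (pvMx f P m (k + 1)) j k := by
          simp only [pvArg, if_neg hne]
        rw [this]
        exact congrArg Prod.mk rfl ▸ congrArg _ (pvArg_default f P _ ((k : Int) + 1) j k hattain)
      · rw [if_neg hgt]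
        have hle : pvMx f P (f ((k : Int) + 1)) k = f ((k : Int) + 1) := by
          have := pvMx_le f P (f ((k : Int) + 1)) k; omega
        have hM : pvMx f P m (k + 1) = f ((k : Int) + 1) := by
          rw [hmx]; rw [hraise] at hle; omega
        have hmgt : pvMx f P m (k + 1) > m := by omega
        rw [if_pos hmgt]
        have hc : P ((k : Int) + 1) ∧ f ((k : Int) + 1) = pvMx f P m (k + 1) := ⟨hq.2, hM.symm⟩
        simp only [pvArg, if_pos hc]
        exact Prod.ext (by omega) rfl
    · rw [if_neg hq, ih]
      have hmx : pvMx f P m (k + 1) = pvMx f P m k := by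
        simp only [pvMx]
        split_ifs with hp
        · have : f ((k : Int) + 1) ≤ m := by
            by_contra hgt; exact hq ⟨by omega, hp⟩
          have := pvMx_le f P m k; omega
        · rfl
      rw [hmx]
      by_cases hmgt : pvMx f P m k > m
      · rw [if_pos hmgt, if_pos hmgt]
        have hne : ¬ (P ((k : Int) + 1) ∧ f ((k : Int) + 1) = pvMx f P m k) := by
          rintro ⟨hp, he⟩
          exact hq ⟨by omega, hp⟩
        simp only [pvArg, if_neg hne]
      · rw [if_neg hmgt, if_neg hmgt]

-- pvSearchB agrees with pvArg whenever M is attained in 1..k.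
lemma pvSearchB_eq_pvArg (score : List Int) (M j : Int) :
    ∀ k : Nat,
      (∃ i : Nat, 1 ≤ i ∧ i ≤ k ∧ PySem.List.pyGetD score ((i : Int) - 1) 0 ≠ 0 ∧
        PySem.List.pyGetD score (i : Int) 0 - PySem.List.pyGetD score ((i : Int) - 1) 0 = M) →
      pvSearchB score M k
        = pvArg (fun i => PySem.List.pyGetD score i 0 - PySem.List.pyGetD score (i - 1) 0)
            (fun i => PySem.List.pyGetD score (i - 1) 0 ≠ 0) M j k := by
  intro k
  induction k with
  | zero => rintro ⟨i, h1, h2, _⟩; omega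
  | succ k ih =>
    rintro ⟨i, h1, h2, h3, h4⟩
    simp only [pvSearchB, pvArg]
    have harith : ((k : Int) + 1 - 1) = (k : Int) := by ring
    by_cases hc : PySem.List.pyGetD score ((k : Int) + 1 - 1) 0 ≠ 0 ∧
        PySem.List.pyGetD score ((k : Int) + 1) 0 - PySem.List.pyGetD score ((k : Int) + 1 - 1) 0 = M
    · rw [if_pos hc]
      rw [harith] at hc
      rw [if_neg (by simp only [not_or, not_not]; exact ⟨hc.2, hc.1⟩)]
    · rw [if_neg hc]
      rw [harith] at hc
      rw [if_pos (by by_contra h; simp only [not_or, not_not] at h; exact hc ⟨h.2, h.1⟩)]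
      apply ih
      refine ⟨i, h1, ?_, h3, h4⟩
      rcases Nat.lt_or_ge i (k + 1) with hlt | hge
      · omega
      · exfalso
        have : i = k + 1 := by omega
        subst this
        push_cast at h3 h4
        rw [show ((k : Int) + 1 - 1) = (k : Int) from by ring] at h3 h4
        exact hc ⟨h3, h4⟩

-- B's stage-1 max over the ascending qualifying deltas, floored at 0, is pvMx 0 k.
def pvBest0 : Option Int → Int
  | some v => max 0 v
  | none => 0

lemma pvBest_eq (f : Int → Int) (P : Int → Prop) [DecidablePred P] :
    ∀ k : Nat,
    pvBest0 (PySem.List.max?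
        ((PySem.List.pyRange 1 ((k : Int) + 1) 1).filterMap (fun i => if P i then some (f i) else none))
        (fun x => x)) = pvMx f P 0 k := by
  intro k
  induction k with
  | zero =>
    rw [PySem.List.pyRange_one_eq_nil (by norm_num)]
    simp [PySem.List.max?, pvMx, pvBest0]
  | succ k ih =>
    have hcast : (((k + 1 : Nat) : Int) + 1) = ((k : Int) + 1) + 1 := by push_cast; ring
    rw [hcast, PySem.List.pyRange_one_succ_right (by omega), List.filterMap_append]
    simp only [List.filterMap_cons, List.filterMap_nil]
    by_cases hp : P ((k : Int) + 1)
    · rw [if_pos hp]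
      set L := (PySem.List.pyRange 1 ((k : Int) + 1) 1).filterMap (fun i => if P i then some (f i) else none) with hL
      have hmx : pvMx f P 0 (k + 1) = max (pvMx f P 0 k) (f ((k : Int) + 1)) := by
        simp only [pvMx, if_pos hp]
      cases hLc : L with
      | nil =>
        rw [List.nil_append, PySem.List.max?_id_cons]
        have h0 : pvMx f P 0 k = 0 := by
          rw [← ih, hLc]; simp [PySem.List.max?, pvBest0]
        rw [hmx, h0]
        simp [pvBest0]
      | cons x t =>
        simp only [List.cons_append]
        rw [PySem.List.max?_id_cons, List.foldl_append]
        simp only [List.foldl_cons, List.foldl_nil]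
        rw [hmx, ← ih, hLc, PySem.List.max?_id_cons]
        simp only [pvBest0]
        omega
    · rw [if_neg hp]
      simp only [List.append_nil]
      have hmx : pvMx f P 0 (k + 1) = pvMx f P 0 k := by
        simp only [pvMx, if_neg hp]
      rw [hmx, ← ih]

-- ===== VERDICT (by name: the statement is the Claim_ definition above) =====
theorem MaxDelta_spec : Claim_equal_MaxDelta := by
  intro score args task size_df _
  unfold Spec_MaxDelta
  set f := fun (i : Int) => PySem.List.pyGetD score i 0 - PySem.List.pyGetD score (i - 1) 0 with hf
  set P := fun (i : Int) => PySem.List.pyGetD score (i - 1) 0 ≠ 0 with hP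
  rcases Nat.eq_zero_or_pos score.length with h0 | hpos
  · simp only [MaxDelta, MaxDelta_alt, PySem.List.len_eq, h0]
    rw [PySem.List.pyRange_neg_one_eq_nil (by omega), PySem.List.pyRange_one_eq_nil (by omega)]
    simp [PySem.List.max?]
  · have hk : ((score.length - 1 : Nat) : Int) = (score.length : Int) - 1 := by omega
    have hA := pvAeq f P (score.length - 1) 0 ((score.length : Int) - 1)
    rw [hk] at hA
    have hB := pvBest_eq f P (score.length - 1)
    rw [show (((score.length - 1 : Nat) : Int) + 1) = (score.length : Int) from by omega] at hB
    simp only [MaxDelta, MaxDelta_alt, PySem.List.len_eq]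
    rw [hA]
    set M := pvMx f P 0 (score.length - 1) with hM
    have hM0 : 0 ≤ M := pvMx_le f P 0 (score.length - 1)
    cases hmax : PySem.List.max?
        ((PySem.List.pyRange 1 ((score.length : Int)) 1).filterMap (fun i => if P i then some (f i) else none))
        (fun x => x) with
    | none =>
      rw [hmax] at hB
      simp only [pvBest0] at hB
      have : ¬ M > 0 := by omega
      rw [if_neg this]
      simp
    | some v =>
      rw [hmax] at hB
      simp only [pvBest0] at hB
      by_cases hv : v ≤ 0
      · have hMz : M = 0 := by omega
        rw [if_neg (by omega), if_pos hv]
      · have hMv : M = v := by omega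
        rw [if_pos (by omega), if_neg hv]
        have hattain : ∃ i : Nat, 1 ≤ i ∧ i ≤ score.length - 1 ∧ P (i : Int) ∧ f (i : Int) = M :=
          pvMx_attained f P 0 (score.length - 1) (by omega)
        have hsearch := pvSearchB_eq_pvArg score v ((score.length : Int) - 1) (score.length - 1)
          (by obtain ⟨i, h1, h2, h3, h4⟩ := hattain
              exact ⟨i, h1, h2, h3, by rw [← hMv]; exact h4⟩)
        rw [hsearch, hMv]
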